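-- pv_equiv track=rewrite | github.com/jsm28/medal-boundaries | medalbound/algorithms.py | get_cum_alternatives
-- ===== SOURCE A (Python) =====
-- def get_cum_alternatives(ideal_cum, cum_stats):
--     """Return alternatives for the number of medals around an ideal value."""
--     num_below = 0
--     for i in range(len(cum_stats)-1, -1, -1):
--         if cum_stats[i] <= ideal_cum:
--             num_below = cum_stats[i]
--         if cum_stats[i] >= ideal_cum:
--             return (num_below, cum_stats[i])
--     raise ValueError('Ideal number of medals exceeds number of contestants')
-- ===== SOURCE B (Python) =====
-- def get_cum_alternatives(ideal_cum, cum_stats):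
--     """Return alternatives for the number of medals around an ideal value."""
--     j = None
--     for i, v in enumerate(cum_stats):
--         if v >= ideal_cum:
--             j = i
--     if j is None:
--         raise ValueError('Ideal number of medals exceeds number of contestants')
--     above = cum_stats[j]
--     if above <= ideal_cum:
--         below = above
--     elif j + 1 < len(cum_stats):
--         below = cum_stats[j + 1]
--     else:
--         below = 0
--     return (below, above)
-- ===== Notes on version B (the rewrite author's own statement) =====
-- stated objective: alternative
-- what changed: A scans backwards maintaining a running num_below accumulator and early-returns; B scans forwards once to find only the last index j whose value reaches ideal_cum, then assembles the pair directly from cum_stats[j] and cum_stats[j+1] by a closed-form case split, with no accumulator and no early return.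
import Mathlib
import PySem

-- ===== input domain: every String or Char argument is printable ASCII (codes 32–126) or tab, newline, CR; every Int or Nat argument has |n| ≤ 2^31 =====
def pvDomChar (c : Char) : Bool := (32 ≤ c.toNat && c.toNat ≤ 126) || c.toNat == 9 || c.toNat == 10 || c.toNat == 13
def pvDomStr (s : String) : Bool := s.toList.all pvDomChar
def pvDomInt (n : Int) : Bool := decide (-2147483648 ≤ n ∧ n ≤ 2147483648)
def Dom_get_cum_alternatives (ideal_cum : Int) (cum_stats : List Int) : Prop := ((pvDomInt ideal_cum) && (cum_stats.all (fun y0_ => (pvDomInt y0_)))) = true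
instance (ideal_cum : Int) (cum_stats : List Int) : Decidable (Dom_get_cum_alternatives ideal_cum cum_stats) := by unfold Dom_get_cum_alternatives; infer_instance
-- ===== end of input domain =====

-- B replaces A's backward scan with num_below accumulator by a forward scan for the last
-- index reaching ideal_cum plus a closed-form assembly of the pair (objective: alternative).
-- Both Pythons raise ValueError when no element reaches ideal_cum; Pre_ excludes exactly that.

-- ===== PORT A =====
-- the backward loop 'for i in range(len(cum_stats)-1, -1, -1)': recursion on the number of
-- remaining indices; index i = n in the n+1 case; cum_stats[i] is always in range here.
def pvGoA (ideal : Int) (cs : List Int) : Nat → Int → Option (List Int)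
  | 0, _ => none                         -- loop ends: raise ValueError
  | n+1, nb =>
    let v := cs.getD n 0
    let nb' := if v ≤ ideal then v else nb
    if ideal ≤ v then some [nb', v] else pvGoA ideal cs n nb'

def get_cum_alternatives (ideal_cum : Int) (cum_stats : List Int) : List Int :=
  (pvGoA ideal_cum cum_stats cum_stats.length 0).getD []

-- ===== PORT B =====
-- 'j = None; for i, v in enumerate(cum_stats): if v >= ideal_cum: j = i'
def pvLastGe (ideal : Int) (cs : List Int) : Option Int :=
  (PySem.List.enumerate cs 0).foldl (fun acc p => if ideal ≤ p.2 then some p.1 else acc) none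

def get_cum_alternatives_alt (ideal_cum : Int) (cum_stats : List Int) : List Int :=
  match pvLastGe ideal_cum cum_stats with
  | none => []                           -- raise ValueError
  | some j =>
    let above := PySem.List.pyGetD cum_stats j 0
    let below :=
      if above ≤ ideal_cum then above
      else if j + 1 < (cum_stats.length : Int) then PySem.List.pyGetD cum_stats (j + 1) 0
      else 0
    [below, above]

-- ===== PRECONDITION & SPEC =====
-- Both A and B raise ValueError exactly when no element reaches ideal_cum; Pre_ excludes those inputs.
def Pre_get_cum_alternatives (ideal_cum : Int) (cum_stats : List Int) : Prop :=
  ∃ x ∈ cum_stats, ideal_cum ≤ x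
instance (ideal_cum : Int) (cum_stats : List Int) : Decidable (Pre_get_cum_alternatives ideal_cum cum_stats) := by unfold Pre_get_cum_alternatives; infer_instance

def pvWitness_get_cum_alternatives : Int × List Int := (3, [10, 5, 2])

def Spec_get_cum_alternatives (ideal_cum : Int) (cum_stats : List Int) (out : List Int) : Prop := out = get_cum_alternatives_alt ideal_cum cum_stats
instance (ideal_cum : Int) (cum_stats : List Int) (out : List Int) : Decidable (Spec_get_cum_alternatives ideal_cum cum_stats out) := by unfold Spec_get_cum_alternatives; infer_instance

-- ===== CLAIM (what is proved, stated in full; the proofs are below) =====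
def Claim_equal_get_cum_alternatives : Prop := ∀ (ideal_cum : Int) (cum_stats : List Int), Dom_get_cum_alternatives ideal_cum cum_stats → Pre_get_cum_alternatives ideal_cum cum_stats → Spec_get_cum_alternatives ideal_cum cum_stats (get_cum_alternatives ideal_cum cum_stats)

-- ===== LEMMAS AND PROOFS =====

-- A's loop, run from n remaining indices, once j is the last index reaching ideal.
theorem pvGoA_char (ideal : Int) (cs : List Int) (j : Nat)
    (hjlen : j < cs.length) (hjge : ideal ≤ cs.getD j 0)
    (habove : ∀ k, j < k → k < cs.length → cs.getD k 0 < ideal) :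
    ∀ n, j + 1 ≤ n → n ≤ cs.length → ∀ nb,
      pvGoA ideal cs n nb =
        some [if cs.getD j 0 ≤ ideal then cs.getD j 0
              else if j + 1 < n then cs.getD (j+1) 0 else nb,
              cs.getD j 0] := by
  intro n
  induction n with
  | zero => omega
  | succ m ih =>
    intro h1 h2 nb
    by_cases hm : j = m
    · subst hm
      simp only [pvGoA]
      rw [if_pos hjge, if_neg (show ¬ j + 1 < j + 1 by omega)]
    · have hmj : j + 1 ≤ m := by omega
      have hlt : cs.getD m 0 < ideal := habove m (by omega) (by omega)
      simp only [pvGoA]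
      rw [if_neg (show ¬ ideal ≤ cs.getD m 0 by omega),
        if_pos (show cs.getD m 0 ≤ ideal by omega),
        ih hmj (by omega) (cs.getD m 0)]
      by_cases hc : cs.getD j 0 ≤ ideal
      · rw [if_pos hc, if_pos hc]
      · rw [if_neg hc, if_neg hc, if_pos (show j + 1 < m + 1 by omega)]
        by_cases hjm : j + 1 < m
        · rw [if_pos hjm]
        · rw [if_neg hjm, show m = j + 1 by omega]

theorem pvLastGe_append (ideal : Int) (cs : List Int) (x : Int) :
    pvLastGe ideal (cs ++ [x]) =
      if ideal ≤ x then some (cs.length : Int) else pvLastGe ideal cs := by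
  simp [pvLastGe, PySem.List.enumerate_append, PySem.List.enumerate_cons,
    PySem.List.enumerate_nil, List.foldl_append]

-- B's search finds the last index whose value reaches ideal.
theorem pvLastGe_spec (ideal : Int) (cs : List Int)
    (hpre : ∃ x ∈ cs, ideal ≤ x) :
    ∃ j : Nat, pvLastGe ideal cs = some (j : Int) ∧ j < cs.length ∧
      ideal ≤ cs.getD j 0 ∧ ∀ k, j < k → k < cs.length → cs.getD k 0 < ideal := by
  induction cs using List.reverseRecOn with
  | nil => simp at hpre
  | append_singleton cs x ih =>
    by_cases hx : ideal ≤ x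
    · refine ⟨cs.length, ?_, by simp, ?_, ?_⟩
      · rw [pvLastGe_append]; simp [hx]
      · rw [List.getD_append_right cs [x] 0 cs.length (le_refl _)]
        simpa using hx
      · intro k hk1 hk2; simp at hk2; omega
    · have hpre' : ∃ y ∈ cs, ideal ≤ y := by
        obtain ⟨y, hy, hyge⟩ := hpre
        simp at hy
        rcases hy with hy | hy
        · exact ⟨y, hy, hyge⟩
        · subst hy; exact absurd hyge hx
      obtain ⟨j, hfind, hjlen, hjge, habove⟩ := ih hpre'
      refine ⟨j, ?_, by simp; omega, ?_, ?_⟩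
      · rw [pvLastGe_append]; simp [hx, hfind]
      · rwa [List.getD_append cs [x] 0 j hjlen]
      · intro k hk1 hk2
        simp at hk2
        by_cases hklen : k < cs.length
        · rw [List.getD_append cs [x] 0 k hklen]; exact habove k hk1 hklen
        · have hke : k = cs.length := by omega
          subst hke
          rw [List.getD_append_right cs [x] 0 cs.length (le_refl _)]
          simpa using by omega

-- ===== VERDICT (by name: the statement is the Claim_ definition above) =====
theorem get_cum_alternatives_spec : Claim_equal_get_cum_alternatives := by
  intro ideal cs _ hpre
  obtain ⟨j, hfind, hjlen, hjge, habove⟩ := pvLastGe_spec ideal cs hpre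
  unfold Spec_get_cum_alternatives get_cum_alternatives get_cum_alternatives_alt
  rw [pvGoA_char ideal cs j hjlen hjge habove cs.length (by omega) (le_refl _) 0, hfind]
  have h2 : PySem.List.pyGetD cs ((j : Int) + 1) 0 = cs.getD (j+1) 0 := by
    rw [show ((j : Int) + 1) = ((j + 1 : Nat) : Int) by push_cast; ring]
    simp only [PySem.List.pyGetD_natCast]
  have h3 : ((j : Int) + 1 < (cs.length : Int)) ↔ (j + 1 < cs.length) := by
    constructor <;> (intro h; omega)
  simp only [Option.getD_some, PySem.List.pyGetD_natCast, h2, h3]
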